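-- pv_equiv track=rewrite | github.com/matthewmcccc/wdijr | backend/app/analysis/network_builder.py | build_character_occurence
-- ===== SOURCE A (Python) =====
-- from collections import Counter, defaultdict
--
-- def build_character_occurence(paras: list[str], character_dict: dict) -> dict:
--     occurences = Counter()
--     for para in paras:
--         para_lower = para.lower()
--         for variant, canonical in character_dict.items():
--             if variant in para_lower:
--                 occurences[canonical] += 1
--     return occurences
-- ===== SOURCE B (Python) =====
-- from collections import Counter
--
-- def build_character_occurence(paras: list[str], character_dict: dict) -> dict:
--     occurences = Counter()
--     maxlen = 0
--     for variant in character_dict: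
--         maxlen = max(maxlen, len(variant))
--     for para in paras:
--         p = para.lower()
--         # index of every substring of p no longer than the longest variant:
--         # one membership probe per variant replaces a substring scan of p
--         grams = {p[i:i + k] for i in range(len(p) + 1) for k in range(maxlen + 1)}
--         for variant, canonical in character_dict.items():
--             if variant in grams:
--                 occurences[canonical] += 1
--     return occurences
-- ===== Notes on version B (the rewrite author's own statement) =====
-- stated objective: alternative
-- what changed: A tests every variant against every paragraph with a linear substring search; B precomputes the longest variant length, builds per paragraph a hash set of all its substrings up to that length, and decides each variant's presence by one set-membership probe instead of a substring scan.
import Mathlib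
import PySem

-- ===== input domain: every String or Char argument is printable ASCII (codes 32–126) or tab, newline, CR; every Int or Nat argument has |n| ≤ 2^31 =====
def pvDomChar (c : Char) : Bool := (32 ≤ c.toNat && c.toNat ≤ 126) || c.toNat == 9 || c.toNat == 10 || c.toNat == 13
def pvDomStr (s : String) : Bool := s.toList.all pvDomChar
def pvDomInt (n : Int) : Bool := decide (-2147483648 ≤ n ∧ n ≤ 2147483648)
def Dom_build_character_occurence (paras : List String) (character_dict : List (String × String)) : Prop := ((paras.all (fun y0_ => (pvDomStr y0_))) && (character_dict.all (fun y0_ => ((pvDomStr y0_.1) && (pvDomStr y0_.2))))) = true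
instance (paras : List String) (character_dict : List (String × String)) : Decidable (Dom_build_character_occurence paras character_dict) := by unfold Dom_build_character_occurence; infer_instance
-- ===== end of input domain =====

-- B replaces A's per-variant substring scan of each paragraph by a per-paragraph index of all
-- substrings no longer than the longest variant, probed once per variant; objective: alternative.


-- ===== PORT A =====
-- character_dict arrives as a Python dict: decode the association list with dict semantics
-- (duplicate variants: last value wins, position of first occurrence).
def build_character_occurence (paras : List String) (character_dict : List (String × String)) : List (String × Int) :=
  let d : PySem.Dict String String :=
    character_dict.foldl (fun d q => d.insert q.1 q.2) PySem.Dict.empty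
  let occurences : PySem.Dict String Int :=
    paras.foldl (fun occ para =>
      let para_lower := PySem.Str.lower para
      d.items.foldl (fun occ q =>
        if PySem.Str.isIn q.1 para_lower then occ.modify q.2 0 (· + 1) else occ) occ)
      PySem.Dict.empty
  occurences.items

-- ===== PORT B =====
def build_character_occurence_alt (paras : List String) (character_dict : List (String × String)) : List (String × Int) :=
  let d : PySem.Dict String String :=
    character_dict.foldl (fun d q => d.insert q.1 q.2) PySem.Dict.empty
  let maxlen : Int := d.keys.foldl (fun m v => max m (PySem.Str.len v)) 0
  let occurences : PySem.Dict String Int :=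
    paras.foldl (fun occ para =>
      let p := PySem.Str.lower para
      -- the set comprehension {p[i:i+k] for i in range(len(p)+1) for k in range(maxlen+1)}
      let grams : PySem.Set String := PySem.Set.ofList
        ((PySem.List.pyRange 0 (PySem.Str.len p + 1) 1).flatMap (fun i =>
          (PySem.List.pyRange 0 (maxlen + 1) 1).map (fun k =>
            PySem.Str.slice p (some i) (some (i + k)))))
      d.items.foldl (fun occ q =>
        if PySem.Set.contains grams q.1 then occ.modify q.2 0 (· + 1) else occ) occ)
      PySem.Dict.empty
  occurences.items

-- ===== PRECONDITION & SPEC =====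
def Spec_build_character_occurence (paras : List String) (character_dict : List (String × String)) (out : List (String × Int)) : Prop := out = build_character_occurence_alt paras character_dict
instance (paras : List String) (character_dict : List (String × String)) (out : List (String × Int)) : Decidable (Spec_build_character_occurence paras character_dict out) := by unfold Spec_build_character_occurence; infer_instance

-- ===== CLAIM (what is proved, stated in full; the proofs are below) =====
def Claim_equal_build_character_occurence : Prop := ∀ (paras : List String) (character_dict : List (String × String)), Dom_build_character_occurence paras character_dict → Spec_build_character_occurence paras character_dict (build_character_occurence paras character_dict)

-- ===== LEMMAS AND PROOFS =====

-- membership in B's per-paragraph substring index is exactly Python's 'variant in paragraph',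
-- for every variant no longer than maxlen
lemma pv_mem_grams (p v : String) (maxlen : Int) (hv : (v.toList.length : Int) ≤ maxlen) :
    PySem.Set.contains (PySem.Set.ofList
      ((PySem.List.pyRange 0 (PySem.Str.len p + 1) 1).flatMap (fun i =>
        (PySem.List.pyRange 0 (maxlen + 1) 1).map (fun k =>
          PySem.Str.slice p (some i) (some (i + k)))))) v
    = PySem.Str.isIn v p := by
  have hlen : PySem.Str.len p = (p.toList.length : Int) := by simp [pysem]
  by_cases h : PySem.Str.isIn v p = true
  · -- v is an infix of p, short enough: it is one of the slices
    rw [h]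
    obtain ⟨s, t, hst⟩ := (PySem.Str.isIn_iff_infix v p).mp h
    have hmem : v ∈ (PySem.List.pyRange 0 (PySem.Str.len p + 1) 1).flatMap (fun i =>
        (PySem.List.pyRange 0 (maxlen + 1) 1).map (fun k =>
          PySem.Str.slice p (some i) (some (i + k)))) := by
      rw [List.mem_flatMap]
      refine ⟨(s.length : Int), ?_, ?_⟩
      · rw [PySem.List.mem_pyRange_one]
        have : s.length ≤ p.toList.length := by
          rw [← hst]; simp
        constructor
        · positivity
        · rw [hlen]; exact_mod_cast Nat.lt_succ_of_le this
      · rw [List.mem_map]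
        refine ⟨(v.toList.length : Int), ?_, ?_⟩
        · rw [PySem.List.mem_pyRange_one]
          exact ⟨by positivity, by omega⟩
        · apply String.toList_inj.mp
          have hcast : ((s.length : Int) + (v.toList.length : Int)).toNat
              = s.length + v.toList.length := by omega
          have hs : (PySem.Str.slice p (some (s.length : Int))
              (some ((s.length : Int) + (v.toList.length : Int)))).toList
              = (p.toList.drop s.length).take v.toList.length := by
            have h1 := PySem.List.slice_toNat p.toList
              (a := (s.length : Int)) (b := (s.length : Int) + (v.toList.length : Int))
              (by positivity) (by positivity)
            rw [PySem.Str.toList_slice, PySem.Chars.slice_eq_listSlice, h1, hcast]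
            simp
          rw [hs, ← hst]
          simp
    rw [PySem.Set.contains_iff]
    exact (PySem.Set.mem_ofList _ _).mpr hmem
  · -- v not in p: no slice of p equals v
    rw [Bool.not_eq_true] at h
    rw [h, ← Bool.not_eq_true]
    intro hc
    have hmem : v ∈ (PySem.List.pyRange 0 (PySem.Str.len p + 1) 1).flatMap (fun i =>
        (PySem.List.pyRange 0 (maxlen + 1) 1).map (fun k =>
          PySem.Str.slice p (some i) (some (i + k)))) := by simpa [pysem] using hc
    rw [List.mem_flatMap] at hmem
    obtain ⟨i, hi, hmem⟩ := hmem
    rw [List.mem_map] at hmem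
    obtain ⟨k, hk, hvk⟩ := hmem
    rw [PySem.List.mem_pyRange_one] at hi hk
    -- the slice is an infix of p, so v would be in p
    have hinf : v.toList <:+: p.toList := by
      rw [← hvk]
      have := PySem.List.slice_toNat p.toList (a := i) (b := i + k) hi.1 (by omega)
      have hsl : (PySem.Str.slice p (some i) (some (i + k))).toList
          = (p.toList.drop i.toNat).take ((i + k).toNat - i.toNat) := by
        rw [PySem.Str.toList_slice, PySem.Chars.slice_eq_listSlice, this]
      rw [hsl]
      exact (((p.toList.drop i.toNat).take_prefix _).isInfix).trans
        ((p.toList.drop_suffix i.toNat).isInfix)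
    have := (PySem.Str.isIn_iff_infix v p).mpr hinf
    rw [h] at this
    exact absurd this (by simp)

-- every key of the decoded dict is no longer than B's maxlen
lemma pv_len_le_maxlen (keys : List String) (v : String) (hv : v ∈ keys) :
    (v.toList.length : Int) ≤ keys.foldl (fun m v => max m (PySem.Str.len v)) 0 := by
  have h1 : keys.foldl (fun m v => max m (PySem.Str.len v)) 0
      = (keys.map PySem.Str.len).foldl max 0 := by rw [List.foldl_map]
  have h2 : PySem.Str.len v ≤ (keys.map PySem.Str.len).foldl max 0 :=
    (PySem.List.le_foldl_max _ 0).2 _ (List.mem_map_of_mem hv)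
  have h3 : PySem.Str.len v = (v.toList.length : Int) := by simp [pysem]
  omega

-- ===== VERDICT (by name: the statement is the Claim_ definition above) =====
theorem build_character_occurence_spec : Claim_equal_build_character_occurence := by
  intro paras character_dict _
  unfold Spec_build_character_occurence build_character_occurence build_character_occurence_alt
  refine congrArg PySem.Dict.items ?_
  refine PySem.List.foldl_congr_mem _ _ _ _ ?_
  intro occ para _
  refine PySem.List.foldl_congr_mem _ _ _ _ ?_
  intro occ' q hq
  have hk : q.1 ∈ (character_dict.foldl (fun d q => d.insert q.1 q.2)
      (PySem.Dict.empty : PySem.Dict String String)).keys :=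
    List.mem_map_of_mem (f := Prod.fst) hq
  rw [pv_mem_grams _ _ _ (pv_len_le_maxlen _ q.1 hk)]
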